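-- pv_equiv track=rewrite | github.com/piotrgredowski/svarog | src/svarog/_sync/section_mapping.py | _ends_with_unescaped_delimiter
-- ===== SOURCE A (Python) =====
-- import typing as t
--
-- ESCAPE_CHARACTER: t.Final[str] = "\\"
--
-- def _ends_with_unescaped_delimiter(path: str) -> bool:
--     if not path or path[-1] != ".":
--         return False
--
--     escape = False
--     for char in reversed(path[:-1]):
--         if char == ESCAPE_CHARACTER:
--             escape = not escape
--             continue
--         break
--     return not escape
-- ===== SOURCE B (Python) =====
-- import typing as t
--
-- ESCAPE_CHARACTER: t.Final[str] = "\\"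
--
-- def _ends_with_unescaped_delimiter(path: str) -> bool:
--     if not path or path[-1] != ".":
--         return False
--     stripped = path[:-1].rstrip(ESCAPE_CHARACTER)
--     return (len(path) - 1 - len(stripped)) % 2 == 0
-- ===== Notes on version B (the rewrite author's own statement) =====
-- stated objective: simpler
-- what changed: Replaced the reverse char-by-char escape-flag toggling loop with rstrip of the trailing backslash run and a single parity check of its length.
import Mathlib
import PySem

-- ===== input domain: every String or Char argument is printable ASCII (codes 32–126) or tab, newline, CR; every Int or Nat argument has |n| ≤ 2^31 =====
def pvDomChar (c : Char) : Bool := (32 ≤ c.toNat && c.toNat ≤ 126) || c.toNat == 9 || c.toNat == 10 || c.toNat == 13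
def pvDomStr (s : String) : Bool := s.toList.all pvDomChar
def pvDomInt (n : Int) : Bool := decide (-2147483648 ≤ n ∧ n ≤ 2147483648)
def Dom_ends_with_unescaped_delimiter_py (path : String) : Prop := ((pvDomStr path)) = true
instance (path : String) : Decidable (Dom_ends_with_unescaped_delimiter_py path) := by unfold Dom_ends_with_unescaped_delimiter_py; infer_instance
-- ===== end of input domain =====

-- B replaces A's reversed toggling loop by rstrip of the trailing backslash run plus one parity check (objective: simpler).


-- ===== PORT A =====
-- the for-loop over reversed(path[:-1]): toggles `escape` on '\', breaks at the first other char
def pvLoopA : List Char → Bool → Bool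
  | [], escape => !escape
  | c :: rest, escape =>
      if c = '\\' then pvLoopA rest (!escape) else !escape

def ends_with_unescaped_delimiter_py (path : String) : Bool :=
  let l := path.toList
  match l.getLast? with          -- `if not path or path[-1] != "."` guard
  | some '.' => pvLoopA l.dropLast.reverse false
  | _ => false

-- ===== PORT B =====
def ends_with_unescaped_delimiter_py_alt (path : String) : Bool :=
  let l := path.toList
  if l.getLast? ≠ some '.' then false    -- `if not path or path[-1] != "."` guard
  else
    let body := l.dropLast
    -- path[:-1].rstrip("\\"): exact — drops exactly the trailing run of backslashes
    let stripped := (body.reverse.dropWhile (· = '\\')).reverse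
    decide ((body.length - stripped.length) % 2 = 0)

-- ===== PRECONDITION & SPEC =====
def Spec_ends_with_unescaped_delimiter_py (path : String) (out : Bool) : Prop := out = ends_with_unescaped_delimiter_py_alt path
instance (path : String) (out : Bool) : Decidable (Spec_ends_with_unescaped_delimiter_py path out) := by unfold Spec_ends_with_unescaped_delimiter_py; infer_instance

-- ===== CLAIM (what is proved, stated in full; the proofs are below) =====
def Claim_equal_ends_with_unescaped_delimiter_py : Prop := ∀ (path : String), Dom_ends_with_unescaped_delimiter_py path → Spec_ends_with_unescaped_delimiter_py path (ends_with_unescaped_delimiter_py path)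

-- ===== LEMMAS AND PROOFS =====
theorem pvLoopA_eq (xs : List Char) (e : Bool) :
    pvLoopA xs e
      = decide (((xs.takeWhile (· = '\\')).length + (if e then 1 else 0)) % 2 = 0) := by
  induction xs generalizing e with
  | nil => cases e <;> simp [pvLoopA]
  | cons c rest ih =>
      by_cases h : c = '\\'
      · subst h
        rw [show pvLoopA ('\\' :: rest) e = pvLoopA rest (!e) from by simp [pvLoopA], ih]
        rw [decide_eq_decide]
        cases e <;> (simp [List.takeWhile]; try omega)
      · simp [pvLoopA, List.takeWhile, h]
        cases e <;> simp

theorem run_length (body : List Char) :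
    body.length - (body.reverse.dropWhile (· = '\\')).length
      = (body.reverse.takeWhile (· = '\\')).length := by
  have h := List.takeWhile_append_dropWhile (p := (· = '\\')) (l := body.reverse)
  have h2 := congrArg List.length h
  rw [List.length_append, List.length_reverse] at h2
  omega

-- ===== VERDICT (by name: the statement is the Claim_ definition above) =====
theorem ends_with_unescaped_delimiter_py_spec : Claim_equal_ends_with_unescaped_delimiter_py := by
  intro path _
  unfold Spec_ends_with_unescaped_delimiter_py
  unfold ends_with_unescaped_delimiter_py ends_with_unescaped_delimiter_py_alt
  cases hl : path.toList.getLast? with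
  | none => simp [hl]
  | some c =>
      simp only [hl]
      by_cases hc : c = '.'
      · subst hc
        simp only [pvLoopA_eq, List.length_reverse, if_neg, Bool.false_eq_true,
          not_false_eq_true, Nat.add_zero]
        rw [run_length]
        simp
      · split <;> simp_all
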